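-- pv_equiv track=rewrite | github.com/sidevans55/plo-aligner | cpf_comparison.py | _analyze_bloom_taxonomy
-- ===== SOURCE A (Python) =====
-- from typing import List, Dict, Any
--
-- def _analyze_bloom_taxonomy(text: str) -> Dict[str, bool]:
--     """Analyze text for Bloom's Taxonomy levels"""
--     bloom_verbs = {
--         'remember': ['define', 'describe', 'identify', 'list', 'name', 'recall', 'recognize', 'state'],
--         'understand': ['explain', 'summarize', 'interpret', 'classify', 'compare', 'contrast', 'describe'],
--         'apply': ['apply', 'demonstrate', 'execute', 'implement', 'solve', 'use', 'utilize'],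
--         'analyze': ['analyze', 'examine', 'investigate', 'compare', 'differentiate', 'distinguish'],
--         'evaluate': ['evaluate', 'assess', 'critique', 'judge', 'appraise', 'examine'],
--         'create': ['create', 'design', 'develop', 'formulate', 'generate', 'produce', 'construct']
--     }
--
--     text_lower = text.lower()
--     levels = {}
--
--     for level, verbs in bloom_verbs.items():
--         levels[level] = any(verb in text_lower for verb in verbs)
--
--     return levels
-- ===== SOURCE B (Python) =====
-- # Inverted index: one pass over unique verbs, each tagging every level it belongs to.
-- _VERB_LEVELS = [
--     ('define', ['remember']), ('describe', ['remember', 'understand']),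
--     ('identify', ['remember']), ('list', ['remember']), ('name', ['remember']),
--     ('recall', ['remember']), ('recognize', ['remember']), ('state', ['remember']),
--     ('explain', ['understand']), ('summarize', ['understand']), ('interpret', ['understand']),
--     ('classify', ['understand']), ('compare', ['understand', 'analyze']),
--     ('contrast', ['understand']),
--     ('apply', ['apply']), ('demonstrate', ['apply']), ('execute', ['apply']),
--     ('implement', ['apply']), ('solve', ['apply']), ('use', ['apply']), ('utilize', ['apply']),
--     ('analyze', ['analyze']), ('examine', ['analyze', 'evaluate']), ('investigate', ['analyze']),
--     ('differentiate', ['analyze']), ('distinguish', ['analyze']),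
--     ('evaluate', ['evaluate']), ('assess', ['evaluate']), ('critique', ['evaluate']),
--     ('judge', ['evaluate']), ('appraise', ['evaluate']),
--     ('create', ['create']), ('design', ['create']), ('develop', ['create']),
--     ('formulate', ['create']), ('generate', ['create']), ('produce', ['create']),
--     ('construct', ['create']),
-- ]
--
-- _LEVELS = ['remember', 'understand', 'apply', 'analyze', 'evaluate', 'create']
--
-- def _analyze_bloom_taxonomy(text: str):
--     text_lower = text.lower()
--     hit = set()
--     for verb, lvls in _VERB_LEVELS:
--         if verb in text_lower:
--             hit.update(lvls)
--     return {level: level in hit for level in _LEVELS}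
-- ===== Notes on version B (the rewrite author's own statement) =====
-- stated objective: alternative
-- what changed: Replaced the per-level scan over (possibly repeated) verb lists with a single pass over an inverted index of unique verbs that accumulates the set of hit levels, then emits the six flags from that set.
import Mathlib
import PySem

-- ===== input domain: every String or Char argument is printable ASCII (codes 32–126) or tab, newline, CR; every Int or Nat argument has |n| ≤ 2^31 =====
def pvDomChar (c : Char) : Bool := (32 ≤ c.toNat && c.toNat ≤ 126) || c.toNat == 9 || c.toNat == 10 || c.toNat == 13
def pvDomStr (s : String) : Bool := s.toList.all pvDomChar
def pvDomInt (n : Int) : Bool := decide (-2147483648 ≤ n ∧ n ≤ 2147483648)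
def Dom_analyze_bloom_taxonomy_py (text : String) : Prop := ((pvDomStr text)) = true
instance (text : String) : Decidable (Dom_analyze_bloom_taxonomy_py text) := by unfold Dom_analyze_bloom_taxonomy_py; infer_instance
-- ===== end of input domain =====

-- B replaces A's per-level scans (with verbs repeated across levels) by one pass over an
-- inverted index of unique verbs that accumulates the set of hit levels (objective: alternative).

-- ===== PORT A =====
-- bloom_verbs dict literal of A, in insertion order
def pvBloomVerbs : List (String × List String) :=
  [("remember", ["define", "describe", "identify", "list", "name", "recall", "recognize", "state"]),
   ("understand", ["explain", "summarize", "interpret", "classify", "compare", "contrast", "describe"]),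
   ("apply", ["apply", "demonstrate", "execute", "implement", "solve", "use", "utilize"]),
   ("analyze", ["analyze", "examine", "investigate", "compare", "differentiate", "distinguish"]),
   ("evaluate", ["evaluate", "assess", "critique", "judge", "appraise", "examine"]),
   ("create", ["create", "design", "develop", "formulate", "generate", "produce", "construct"])]

def analyze_bloom_taxonomy_py (text : String) : List (String × Bool) :=
  let text_lower := PySem.Str.lower text
  (pvBloomVerbs.foldl
    (fun levels p =>
      PySem.Dict.insert levels p.1 (p.2.any (fun verb => PySem.Str.isIn verb text_lower)))
    PySem.Dict.empty).items

-- ===== PORT B =====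
-- inverted index: each unique verb with the list of levels it belongs to (B's _VERB_LEVELS)
def pvVerbLevels : List (String × List String) :=
  [("define", ["remember"]),
   ("describe", ["remember", "understand"]),
   ("identify", ["remember"]),
   ("list", ["remember"]),
   ("name", ["remember"]),
   ("recall", ["remember"]),
   ("recognize", ["remember"]),
   ("state", ["remember"]),
   ("explain", ["understand"]),
   ("summarize", ["understand"]),
   ("interpret", ["understand"]),
   ("classify", ["understand"]),
   ("compare", ["understand", "analyze"]),
   ("contrast", ["understand"]),
   ("apply", ["apply"]),
   ("demonstrate", ["apply"]),
   ("execute", ["apply"]),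
   ("implement", ["apply"]),
   ("solve", ["apply"]),
   ("use", ["apply"]),
   ("utilize", ["apply"]),
   ("analyze", ["analyze"]),
   ("examine", ["analyze", "evaluate"]),
   ("investigate", ["analyze"]),
   ("differentiate", ["analyze"]),
   ("distinguish", ["analyze"]),
   ("evaluate", ["evaluate"]),
   ("assess", ["evaluate"]),
   ("critique", ["evaluate"]),
   ("judge", ["evaluate"]),
   ("appraise", ["evaluate"]),
   ("create", ["create"]),
   ("design", ["create"]),
   ("develop", ["create"]),
   ("formulate", ["create"]),
   ("generate", ["create"]),
   ("produce", ["create"]),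
   ("construct", ["create"])]

def pvLevels : List String := ["remember", "understand", "apply", "analyze", "evaluate", "create"]

def analyze_bloom_taxonomy_py_alt (text : String) : List (String × Bool) :=
  let text_lower := PySem.Str.lower text
  let hit : PySem.Set String :=
    pvVerbLevels.foldl
      (fun s p => if PySem.Str.isIn p.1 text_lower then PySem.Set.update s p.2 else s)
      PySem.Set.empty
  pvLevels.map (fun level => (level, PySem.Set.contains hit level))

-- ===== PRECONDITION & SPEC =====
def Spec_analyze_bloom_taxonomy_py (text : String) (out : List (String × Bool)) : Prop := out = analyze_bloom_taxonomy_py_alt text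
instance (text : String) (out : List (String × Bool)) : Decidable (Spec_analyze_bloom_taxonomy_py text out) := by unfold Spec_analyze_bloom_taxonomy_py; infer_instance

-- ===== CLAIM (what is proved, stated in full; the proofs are below) =====
def Claim_equal_analyze_bloom_taxonomy_py : Prop := ∀ (text : String), Dom_analyze_bloom_taxonomy_py text → Spec_analyze_bloom_taxonomy_py text (analyze_bloom_taxonomy_py text)

-- ===== LEMMAS AND PROOFS =====

-- the accumulated hit set contains a level iff some already-processed verb occurring in the
-- text carries that level (Bool form, for direct rewriting of B's fold)
theorem pv_contains_fold (tl : String) (l : String) :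
    ∀ (pairs : List (String × List String)) (s : PySem.Set String),
      PySem.Set.contains
        (pairs.foldl
          (fun s p => if PySem.Str.isIn p.1 tl then PySem.Set.update s p.2 else s) s) l
      = (PySem.Set.contains s l
          || pairs.any (fun p => PySem.Str.isIn p.1 tl && p.2.contains l)) := by
  intro pairs
  induction pairs with
  | nil => intro s; simp
  | cons p rest ih =>
      intro s
      simp only [List.foldl_cons, List.any_cons]
      by_cases h : PySem.Str.isIn p.1 tl = true
      · rw [if_pos h, ih, h]
        have : PySem.Set.contains (PySem.Set.update s p.2) l
            = (PySem.Set.contains s l || p.2.contains l) := by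
          simp only [PySem.Set.contains_eq_listContains]
          by_cases hm : l ∈ PySem.Set.update s p.2
          · have := (PySem.Set.mem_update s p.2 l).mp hm
            simp only [List.contains_eq_mem, hm]
            rcases this with h1 | h1 <;> simp [h1]
          · have h1 : ¬ l ∈ s := fun hs => hm ((PySem.Set.mem_update s p.2 l).mpr (Or.inl hs))
            have h2 : ¬ l ∈ p.2 := fun hs => hm ((PySem.Set.mem_update s p.2 l).mpr (Or.inr hs))
            simp [List.contains_eq_mem, hm, h1, h2]
        rw [this, Bool.true_and, Bool.or_assoc]
      · rw [if_neg h, ih]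
        simp only [Bool.not_eq_true] at h
        rw [h, Bool.false_and, Bool.false_or]

-- A's result, evaluated on the literal bloom_verbs table (keys distinct, so the six inserts append)
theorem pvA_eval (text : String) :
    analyze_bloom_taxonomy_py text =
      [("remember", ["define", "describe", "identify", "list", "name", "recall", "recognize", "state"].any (fun v => PySem.Str.isIn v (PySem.Str.lower text))),
       ("understand", ["explain", "summarize", "interpret", "classify", "compare", "contrast", "describe"].any (fun v => PySem.Str.isIn v (PySem.Str.lower text))),
       ("apply", ["apply", "demonstrate", "execute", "implement", "solve", "use", "utilize"].any (fun v => PySem.Str.isIn v (PySem.Str.lower text))),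
       ("analyze", ["analyze", "examine", "investigate", "compare", "differentiate", "distinguish"].any (fun v => PySem.Str.isIn v (PySem.Str.lower text))),
       ("evaluate", ["evaluate", "assess", "critique", "judge", "appraise", "examine"].any (fun v => PySem.Str.isIn v (PySem.Str.lower text))),
       ("create", ["create", "design", "develop", "formulate", "generate", "produce", "construct"].any (fun v => PySem.Str.isIn v (PySem.Str.lower text)))] := rfl

-- B's result, evaluated on the literal inverted index: per level, the unique verbs carrying it,
-- in first-occurrence order
theorem pvB_eval (text : String) :
    analyze_bloom_taxonomy_py_alt text =
      [("remember", ["define", "describe", "identify", "list", "name", "recall", "recognize", "state"].any (fun v => PySem.Str.isIn v (PySem.Str.lower text))),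
       ("understand", ["describe", "explain", "summarize", "interpret", "classify", "compare", "contrast"].any (fun v => PySem.Str.isIn v (PySem.Str.lower text))),
       ("apply", ["apply", "demonstrate", "execute", "implement", "solve", "use", "utilize"].any (fun v => PySem.Str.isIn v (PySem.Str.lower text))),
       ("analyze", ["compare", "analyze", "examine", "investigate", "differentiate", "distinguish"].any (fun v => PySem.Str.isIn v (PySem.Str.lower text))),
       ("evaluate", ["examine", "evaluate", "assess", "critique", "judge", "appraise"].any (fun v => PySem.Str.isIn v (PySem.Str.lower text))),
       ("create", ["create", "design", "develop", "formulate", "generate", "produce", "construct"].any (fun v => PySem.Str.isIn v (PySem.Str.lower text)))] := by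
  unfold analyze_bloom_taxonomy_py_alt
  simp only [pvLevels, List.map_cons, List.map_nil, pv_contains_fold]
  simp only [pvVerbLevels, List.any_cons, List.any_nil, List.contains_cons, List.contains_nil]
  simp

-- ===== VERDICT (by name: the statement is the Claim_ definition above) =====
theorem analyze_bloom_taxonomy_py_spec : Claim_equal_analyze_bloom_taxonomy_py := by
  intro text _
  unfold Spec_analyze_bloom_taxonomy_py
  rw [pvA_eval, pvB_eval]
  generalize PySem.Str.lower text = tl
  simp only [List.any_cons, List.any_nil, Bool.or_false]
  -- only 'describe', 'compare', 'examine' belong to two levels, so only their position moved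
  cases h1 : PySem.Str.isIn "describe" tl <;>
    cases h2 : PySem.Str.isIn "compare" tl <;>
      cases h3 : PySem.Str.isIn "examine" tl <;>
        simp [h1, h2, h3]
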